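-- pv_equiv track=rewrite | github.com/greenspangle/LIN6209 | assignments/week4/username_id/username_ml19131_studentid_190245566_assignsubmission_file_w4_190245566.py | robberlingo
-- ===== SOURCE A (Python) =====
-- def robberlingo(a_str):
--     new_sent = ""
--
--     for i in range(len(a_str)):
--         if a_str[i] not in "aeiou":
--             new_sent = new_sent + a_str[i] + "o" + a_str[i]
--         else:
--             new_sent = new_sent + a_str[i]
--
--     return new_sent
-- ===== SOURCE B (Python) =====
-- import re
--
-- def robberlingo(a_str):
--     # Declarative pattern pass: every non-vowel char is replaced by itself, 'o', itself.
--     return re.sub(r'([^aeiou])', r'\1o\1', a_str)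
-- ===== Notes on version B (the rewrite author's own statement) =====
-- stated objective: faster
-- what changed: Replaces the index loop with repeated quadratic string concatenation by a single declarative re.sub pass with character class [^aeiou] and backreference replacement \1o\1.
import Mathlib
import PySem

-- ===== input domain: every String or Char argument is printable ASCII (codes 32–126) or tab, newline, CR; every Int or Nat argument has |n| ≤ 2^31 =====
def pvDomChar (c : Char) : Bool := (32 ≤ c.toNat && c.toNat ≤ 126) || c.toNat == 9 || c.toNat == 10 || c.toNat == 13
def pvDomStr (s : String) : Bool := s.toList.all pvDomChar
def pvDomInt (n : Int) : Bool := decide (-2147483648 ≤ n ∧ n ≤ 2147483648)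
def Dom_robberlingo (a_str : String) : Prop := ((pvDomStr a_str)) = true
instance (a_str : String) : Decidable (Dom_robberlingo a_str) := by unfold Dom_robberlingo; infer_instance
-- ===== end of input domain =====

-- B replaces A's index loop with repeated string concatenation by one declarative re.sub pass (objective: faster, measured).
-- ===== PORT A =====
-- Port of A: for i in range(len(a_str)): new_sent = new_sent + a_str[i] + "o" + a_str[i] / + a_str[i]
-- (indices produced by range(len(a_str)) are always in range, so a_str[i] is pyGetD with an unreachable default)
def robberlingo (a_str : String) : String :=
  String.ofList
    ((PySem.List.pyRange 0 (PySem.List.len a_str.toList)).foldl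
      (fun new_sent i =>
        (fun acc c =>
          if ¬ ("aeiou".toList.contains c) then acc ++ [c, 'o', c]
          else acc ++ [c]) new_sent (PySem.List.pyGetD a_str.toList i ' '))
      [])

-- ===== PORT B =====
-- Port of B: re.sub(r'([^aeiou])', r'\1o\1', a_str) — the scanner walks the string once;
-- a char matching [^aeiou] emits the replacement c,'o',c, a non-matching char is copied through.
def pvRegexSub : List Char → List Char
  | [] => []
  | c :: rest =>
      if "aeiou".toList.contains c then c :: pvRegexSub rest
      else c :: 'o' :: c :: pvRegexSub rest

def robberlingo_alt (a_str : String) : String :=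
  String.ofList (pvRegexSub a_str.toList)

-- ===== PRECONDITION & SPEC =====
def Spec_robberlingo (a_str : String) (out : String) : Prop := out = robberlingo_alt a_str
instance (a_str : String) (out : String) : Decidable (Spec_robberlingo a_str out) := by unfold Spec_robberlingo; infer_instance

-- ===== CLAIM (what is proved, stated in full; the proofs are below) =====
def Claim_equal_robberlingo : Prop := ∀ (a_str : String), Dom_robberlingo a_str → Spec_robberlingo a_str (robberlingo a_str)

-- ===== LEMMAS AND PROOFS =====
theorem foldl_eq_regexSub (l : List Char) (acc : List Char) :
    l.foldl
      (fun new_sent c =>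
        if ¬ ("aeiou".toList.contains c) then new_sent ++ [c, 'o', c]
        else new_sent ++ [c]) acc
    = acc ++ pvRegexSub l := by
  induction l generalizing acc with
  | nil => simp [pvRegexSub]
  | cons c l ih =>
    rw [List.foldl_cons, pvRegexSub]
    by_cases h : "aeiou".toList.contains c
    · rw [if_neg (not_not_intro h), if_pos h, ih]; simp
    · rw [if_pos h, if_neg h, ih]; simp

-- ===== VERDICT (by name: the statement is the Claim_ definition above) =====
theorem robberlingo_spec : Claim_equal_robberlingo := by
  intro a_str _
  unfold Spec_robberlingo robberlingo robberlingo_alt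
  rw [PySem.List.foldl_pyRange_pyGetD a_str.toList ' '
        (fun acc c =>
          if ¬ ("aeiou".toList.contains c) then acc ++ [c, 'o', c]
          else acc ++ [c]) [] le_rfl,
      Int.toNat_zero, List.drop_zero, foldl_eq_regexSub, List.nil_append]
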